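-- pv_equiv track=rewrite | github.com/Frale85/Manufacturing-analysis | Manifacturing.py | count_non_consecutive_repeats
-- ===== SOURCE A (Python) =====
-- def count_non_consecutive_repeats(values):
--     seen = set()
--     non_consecutive_counts = 0
--     for i in range(len(values)):
--         if values[i] in seen and (i == 0 or values[i] != values[i-1]):
--             non_consecutive_counts += 1
--         seen.add(values[i])
--     return non_consecutive_counts
-- ===== SOURCE B (Python) =====
-- def count_non_consecutive_repeats(values):
--     # Collapse maximal runs of equal values into their keys, then use the
--     # closed form: every run whose key already appeared in an earlier run
--     # counts exactly once, so the answer is #runs - #distinct keys.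
--     runs = []
--     for v in values:
--         if not runs or runs[-1] != v:
--             runs.append(v)
--     return len(runs) - len(set(runs))
-- ===== Notes on version B (the rewrite author's own statement) =====
-- stated objective: alternative
-- what changed: Replaces the index-based scan with an incrementally updated seen-set and counter by collapsing the list into its run keys and returning the closed form len(runs) - len(set(runs)).
import Mathlib
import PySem

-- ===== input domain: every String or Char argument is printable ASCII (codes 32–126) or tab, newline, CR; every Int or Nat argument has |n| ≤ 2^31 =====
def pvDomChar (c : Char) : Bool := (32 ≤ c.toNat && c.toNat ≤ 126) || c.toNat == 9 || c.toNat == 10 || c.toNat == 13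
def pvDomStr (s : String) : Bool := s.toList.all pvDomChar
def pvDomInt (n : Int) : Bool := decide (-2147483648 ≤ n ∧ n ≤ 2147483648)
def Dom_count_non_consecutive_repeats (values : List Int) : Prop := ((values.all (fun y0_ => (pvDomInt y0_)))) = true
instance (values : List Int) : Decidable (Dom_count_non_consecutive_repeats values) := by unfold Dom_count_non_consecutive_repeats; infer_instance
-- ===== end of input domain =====

-- B collapses the list into its run keys and returns len(runs) - len(set(runs)) instead of A's
-- index-based scan with a seen-set and counter (objective: alternative decomposition).


-- ===== PORT A =====
-- for i in range(len(values)): if values[i] in seen and (i == 0 or values[i] != values[i-1]): count += 1; seen.add(values[i])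
def count_non_consecutive_repeats (values : List Int) : Int :=
  ((PySem.List.pyRange 0 (PySem.List.len values) 1).foldl
    (fun (st : PySem.Set Int × Int) i =>
      let cnt : Int :=
        if PySem.Set.contains st.1 (PySem.List.pyGetD values i 0) ∧
            (i = 0 ∨ PySem.List.pyGetD values i 0 ≠ PySem.List.pyGetD values (i-1) 0)
        then st.2 + 1 else st.2
      (PySem.Set.add st.1 (PySem.List.pyGetD values i 0), cnt))
    (PySem.Set.empty, 0)).2

-- ===== PORT B =====
-- runs = []; for v in values: if not runs or runs[-1] != v: runs.append(v); return len(runs) - len(set(runs))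
def count_non_consecutive_repeats_alt (values : List Int) : Int :=
  let runs := values.foldl
    (fun (runs : List Int) v =>
      if runs = [] ∨ PySem.List.pyGetD runs (-1) 0 ≠ v then runs ++ [v] else runs) []
  (runs.length : Int) - ((PySem.Set.ofList runs).length : Int)

-- ===== PRECONDITION & SPEC =====
def Spec_count_non_consecutive_repeats (values : List Int) (out : Int) : Prop := out = count_non_consecutive_repeats_alt values
instance (values : List Int) (out : Int) : Decidable (Spec_count_non_consecutive_repeats values out) := by unfold Spec_count_non_consecutive_repeats; infer_instance

-- ===== CLAIM (what is proved, stated in full; the proofs are below) =====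
def Claim_equal_count_non_consecutive_repeats : Prop := ∀ (values : List Int), Dom_count_non_consecutive_repeats values → Spec_count_non_consecutive_repeats values (count_non_consecutive_repeats values)

-- ===== LEMMAS AND PROOFS =====

-- B's loop step in canonical form
def bstep (r : List Int) (v : Int) : List Int :=
  if r.getLast? = some v then r else r ++ [v]

lemma bstep_eq (r : List Int) (v : Int) :
    (if r = [] ∨ PySem.List.pyGetD r (-1) 0 ≠ v then r ++ [v] else r) = bstep r v := by
  unfold bstep
  rcases r.eq_nil_or_concat with h | ⟨ys, y, h⟩
  · subst h; simp
  · subst h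
    simp only [List.concat_eq_append]
    rw [PySem.List.pyGetD_neg_one_append_singleton]
    simp only [List.getLast?_append_cons, List.getLast?_singleton]
    by_cases hv : y = v <;> simp [hv]

def bruns (xs : List Int) : List Int := xs.foldl bstep []

lemma bruns_snoc (xs : List Int) (v : Int) : bruns (xs ++ [v]) = bstep (bruns xs) v := by
  simp [bruns]

lemma getLast?_bruns (xs : List Int) : (bruns xs).getLast? = xs.getLast? := by
  induction xs using List.reverseRecOn with
  | nil => rfl
  | append_singleton xs x ih =>
    rw [bruns_snoc]
    unfold bstep
    by_cases h : (bruns xs).getLast? = some x <;> simp [h]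

lemma ofList_snoc (xs : List Int) (v : Int) :
    PySem.Set.ofList (xs ++ [v]) = PySem.Set.add (PySem.Set.ofList xs) v := by
  simp [PySem.Set.ofList_eq_foldl]

lemma ofList_bruns (xs : List Int) : PySem.Set.ofList (bruns xs) = PySem.Set.ofList xs := by
  induction xs using List.reverseRecOn with
  | nil => rfl
  | append_singleton xs x ih =>
    rw [bruns_snoc, ofList_snoc]
    unfold bstep
    by_cases h : (bruns xs).getLast? = some x
    · have hx : x ∈ bruns xs := List.mem_of_getLast? h
      rw [if_pos h, ih]
      have hx' : x ∈ xs := by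
        have := hx; rw [← PySem.Set.mem_ofList, ih, PySem.Set.mem_ofList] at this; exact this
      simp [PySem.Set.add, PySem.Set.contains, hx']
    · rw [if_neg h, ofList_snoc, ih]

-- A's loop step, named for the proofs
def astep (values : List Int) (st : PySem.Set Int × Int) (i : Int) : PySem.Set Int × Int :=
  let cnt : Int :=
    if PySem.Set.contains st.1 (PySem.List.pyGetD values i 0) ∧
        (i = 0 ∨ PySem.List.pyGetD values i 0 ≠ PySem.List.pyGetD values (i-1) 0)
    then st.2 + 1 else st.2
  (PySem.Set.add st.1 (PySem.List.pyGetD values i 0), cnt)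

lemma A_eq (values : List Int) :
    count_non_consecutive_repeats values
      = ((PySem.List.pyRange 0 (PySem.List.len values) 1).foldl (astep values)
          (PySem.Set.empty, 0)).2 := rfl

lemma main_invariant (values : List Int) (n : Nat) (hn : n ≤ values.length) :
    (PySem.List.pyRange 0 (n : Int) 1).foldl (astep values) (PySem.Set.empty, 0)
      = (PySem.Set.ofList (values.take n),
         ((bruns (values.take n)).length : Int)
           - ((PySem.Set.ofList (values.take n)).length : Int)) := by
  induction n with
  | zero =>
    norm_num [PySem.List.pyRange_one_eq_nil, bruns, PySem.Set.ofList, PySem.Set.empty]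
  | succ m ih =>
    have hm : m < values.length := by omega
    have hcast : ((m+1 : Nat) : Int) = (m:Int) + 1 := by push_cast; ring
    rw [hcast, PySem.List.pyRange_one_succ_right (by positivity), List.foldl_append,
        ih (le_of_lt hm)]
    have htake : values.take (m+1) = values.take m ++ [values[m]] := by
      rw [List.take_add_one]; simp [List.getElem?_eq_getElem hm]
    rw [htake]
    have hget : PySem.List.pyGetD values ((m:Int)) 0 = values[m] := by
      simp [List.getD_eq_getElem?_getD, List.getElem?_eq_getElem hm]
    have hcont : ∀ (l : List Int) (y : Int),
        (PySem.Set.contains (PySem.Set.ofList l) y = true) ↔ y ∈ l := by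
      intro l y
      simp [PySem.Set.contains, PySem.Set.mem_ofList]
    simp only [List.foldl_cons, List.foldl_nil, astep, hget]
    rw [bruns_snoc, ofList_snoc]
    refine Prod.ext rfl ?_
    set p := List.take m values with hp
    set x := values[m] with hxdef
    have hgl := getLast?_bruns p
    have hblen : ((bstep (bruns p) x).length : Int)
        = ((bruns p).length : Int) + (if p.getLast? = some x then 0 else 1) := by
      unfold bstep; rw [hgl]; split_ifs <;> simp
    have haddlen : ((List.length ((PySem.Set.ofList p).add x)) : Int)
        = (List.length (PySem.Set.ofList p) : Int) + (if x ∈ p then 0 else 1) := by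
      by_cases h : x ∈ p
      · rw [PySem.Set.add, if_pos ((hcont p x).mpr h), if_pos h]; ring
      · rw [PySem.Set.add, if_neg (by simpa [hcont p x] using h), if_neg h]
        simp only [List.length_append, List.length_singleton]
        push_cast
        omega
    have hcond : ((PySem.Set.ofList p).contains x = true ∧
          ((m:Int) = 0 ∨ x ≠ PySem.List.pyGetD values ((m:Int) - 1) 0))
        ↔ (x ∈ p ∧ ¬ p.getLast? = some x) := by
      rcases m with _ | k
      · simp [hp]
      · have h1 : ((k+1 : Nat) : Int) ≠ 0 := by push_cast; omega
        have hk : k < values.length := by omega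
        have hprev : PySem.List.pyGetD values (((k+1:Nat):Int) - 1) 0 = values[k] := by
          have h2 : ((k+1:Nat):Int) - 1 = ((k:Nat):Int) := by push_cast; ring
          rw [h2]
          simp [List.getD_eq_getElem?_getD, List.getElem?_eq_getElem hk]
        have hgl2 : p.getLast? = some values[k] := by
          rw [hp, List.getLast?_eq_getElem?]
          have hlen : (List.take (k+1) values).length = k + 1 := by
            simp [List.length_take]; omega
          rw [hlen]
          simp [hk]
        rw [hcont, hprev, hgl2]
        constructor
        · rintro ⟨hmem, h0 | hne⟩
          · exact absurd h0 h1
          · exact ⟨hmem, fun h => hne (Option.some.inj h).symm⟩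
        · rintro ⟨hmem, hne⟩
          exact ⟨hmem, Or.inr fun h => hne (congrArg some h.symm)⟩
    rw [if_congr hcond rfl rfl, hblen, haddlen]
    have hlm : p.getLast? = some x → x ∈ p := fun h => List.mem_of_getLast? h
    split_ifs <;> first | omega | (exfalso; tauto)

-- ===== VERDICT (by name: the statement is the Claim_ definition above) =====
theorem count_non_consecutive_repeats_spec : Claim_equal_count_non_consecutive_repeats := by
  intro values _
  unfold Spec_count_non_consecutive_repeats
  rw [A_eq]
  have h := main_invariant values values.length le_rfl
  simp only [PySem.List.len] at *
  rw [h]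
  simp only [List.take_length]
  unfold count_non_consecutive_repeats_alt
  rw [show (fun (runs : List Int) v => if runs = [] ∨ PySem.List.pyGetD runs (-1) 0 ≠ v then runs ++ [v] else runs) = bstep from funext fun r => funext fun v => bstep_eq r v]
  rw [show values.foldl bstep [] = bruns values from rfl]
  show ((bruns values).length : Int) - ((PySem.Set.ofList values).length : Int)
      = ((bruns values).length : Int) - ((PySem.Set.ofList (bruns values)).length : Int)
  rw [ofList_bruns]
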